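-- pv_equiv track=rewrite | github.com/nekkk/mil-manager | tools/generate-cheats-index.py | build_catalog_name_map
-- ===== SOURCE A (Python) =====
-- def normalize_title_id(value: str) -> str:
--     return str(value or "").strip().upper()
--
-- def build_catalog_name_map(entries: list[dict]) -> dict[str, str]:
--     result: dict[str, str] = {}
--     for entry in entries:
--         title_id = normalize_title_id(entry.get("titleId") or "")
--         name = str(entry.get("name") or "").strip()
--         if title_id and name and title_id not in result:
--             result[title_id] = name
--     return result
-- ===== SOURCE B (Python) =====
-- def normalize_title_id(value: str) -> str:
--     return str(value or "").strip().upper()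
--
--
-- def _dedup_first(pairs):
--     # repeatedly take the head pair and purge its key from the remainder;
--     # no membership test against the output is ever needed
--     out = []
--     while pairs:
--         (t, n) = pairs[0]
--         pairs = [p for p in pairs[1:] if p[0] != t]
--         out.append((t, n))
--     return out
--
--
-- def build_catalog_name_map(entries: list[dict]) -> dict[str, str]:
--     valid = [(t, n)
--              for (t, n) in ((normalize_title_id(e.get("titleId") or ""),
--                              str(e.get("name") or "").strip()) for e in entries)
--              if t and n]
--     return dict(_dedup_first(valid))
-- ===== Notes on version B (the rewrite author's own statement) =====
-- stated objective: alternative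
-- what changed: Replaces the single pass with a dict-membership guard by a two-phase pipeline: first map/filter all entries to valid (title_id, name) pairs, then dedup by repeatedly taking the head pair and filtering its key out of the remainder, so no lookup in the growing result is needed.
import Mathlib
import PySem

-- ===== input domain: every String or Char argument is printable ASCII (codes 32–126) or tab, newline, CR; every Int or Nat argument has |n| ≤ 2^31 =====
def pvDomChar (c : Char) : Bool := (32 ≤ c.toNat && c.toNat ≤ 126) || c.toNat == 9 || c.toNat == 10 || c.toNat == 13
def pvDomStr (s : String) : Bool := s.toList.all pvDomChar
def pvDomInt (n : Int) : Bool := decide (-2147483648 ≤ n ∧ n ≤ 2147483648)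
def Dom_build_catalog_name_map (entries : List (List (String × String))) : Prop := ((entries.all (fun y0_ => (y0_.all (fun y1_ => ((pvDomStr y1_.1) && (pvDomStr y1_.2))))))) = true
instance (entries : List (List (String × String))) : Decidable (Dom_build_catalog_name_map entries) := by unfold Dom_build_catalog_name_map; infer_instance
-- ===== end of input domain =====

-- B replaces A's single pass with a dict-membership guard by a map/filter phase followed by a
-- head-and-purge dedup loop (alternative decomposition, same results).

-- ===== PORT A =====
def pvNormalizeTitleId (value : String) : String := PySem.Str.upper (PySem.Str.strip value)

def build_catalog_name_map (entries : List (List (String × String))) : List (String × String) :=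
  (entries.foldl (fun (result : PySem.Dict String String) entry =>
      let title_id := pvNormalizeTitleId (((PySem.Dict.mk entry).get? "titleId").getD "")
      let name := PySem.Str.strip (((PySem.Dict.mk entry).get? "name").getD "")
      if title_id ≠ "" ∧ name ≠ "" ∧ result.contains title_id = false then
        result.insert title_id name
      else
        result)
    PySem.Dict.empty).items

-- ===== PORT B =====
-- the while-loop of _dedup_first: take head, filter its key out of the rest
def pvDedupFirst : List (String × String) → List (String × String)
  | [] => []
  | p :: rest => p :: pvDedupFirst (rest.filter (fun q => q.1 ≠ p.1))
termination_by l => l.length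
decreasing_by
  simp only [List.length_cons, List.length_unattach]
  exact Nat.lt_succ_of_le (le_trans (List.length_filter_le _ _) (by simp))

def pvValidPairs (entries : List (List (String × String))) : List (String × String) :=
  (entries.map (fun e =>
      (pvNormalizeTitleId (((PySem.Dict.mk e).get? "titleId").getD ""),
       PySem.Str.strip (((PySem.Dict.mk e).get? "name").getD "")))).filter
    (fun p => p.1 ≠ "" && p.2 ≠ "")

def build_catalog_name_map_alt (entries : List (List (String × String))) : List (String × String) :=
  (PySem.Dict.ofList (pvDedupFirst (pvValidPairs entries))).items

-- ===== PRECONDITION & SPEC =====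
def Spec_build_catalog_name_map (entries : List (List (String × String))) (out : List (String × String)) : Prop := out = build_catalog_name_map_alt entries
instance (entries : List (List (String × String))) (out : List (String × String)) : Decidable (Spec_build_catalog_name_map entries out) := by unfold Spec_build_catalog_name_map; infer_instance

-- ===== CLAIM (what is proved, stated in full; the proofs are below) =====
def Claim_equal_build_catalog_name_map : Prop := ∀ (entries : List (List (String × String))), Dom_build_catalog_name_map entries → Spec_build_catalog_name_map entries (build_catalog_name_map entries)

-- ===== LEMMAS AND PROOFS =====
@[simp] lemma pvDedupFirst_nil : pvDedupFirst [] = [] := by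
  simp [pvDedupFirst]

@[simp] lemma pvDedupFirst_cons (p : String × String) (rest : List (String × String)) :
    pvDedupFirst (p :: rest) = p :: pvDedupFirst (rest.filter (fun q => q.1 ≠ p.1)) := by
  rw [pvDedupFirst]

lemma mem_pvDedupFirst_aux (x : String × String) :
    ∀ (N : Nat) (l : List (String × String)), l.length ≤ N → x ∈ pvDedupFirst l → x ∈ l := by
  intro N
  induction N with
  | zero =>
    intro l hl hx
    cases l with
    | nil => simp at hx
    | cons p rest => simp at hl
  | succ N ih =>
    intro l hl hx
    cases l with
    | nil => simp at hx
    | cons p rest =>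
      rw [pvDedupFirst_cons] at hx
      rcases List.mem_cons.mp hx with h | h
      · simp [h]
      · have hlen : (rest.filter (fun q => q.1 ≠ p.1)).length ≤ N :=
          le_trans (List.length_filter_le _ _) (by simpa using hl)
        exact List.mem_cons_of_mem _ (List.mem_of_mem_filter (ih _ hlen h))

lemma mem_pvDedupFirst (x : String × String) (l : List (String × String)) :
    x ∈ pvDedupFirst l → x ∈ l :=
  mem_pvDedupFirst_aux x l.length l le_rfl

lemma pvDedupFirst_keys_nodup_aux :
    ∀ (N : Nat) (l : List (String × String)), l.length ≤ N → ((pvDedupFirst l).map (·.1)).Nodup := by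
  intro N
  induction N with
  | zero =>
    intro l hl
    cases l with
    | nil => simp
    | cons p rest => simp at hl
  | succ N ih =>
    intro l hl
    cases l with
    | nil => simp
    | cons p rest =>
      rw [pvDedupFirst_cons]
      simp only [List.map_cons, List.nodup_cons]
      have hlen : (rest.filter (fun q => q.1 ≠ p.1)).length ≤ N :=
        le_trans (List.length_filter_le _ _) (by simpa using hl)
      refine ⟨?_, ih _ hlen⟩
      intro hmem
      obtain ⟨q, hq, hq1⟩ := List.mem_map.mp hmem
      have hsub := mem_pvDedupFirst q _ hq
      have := (List.mem_filter.mp hsub).2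
      simp only [decide_eq_true_eq] at this
      exact this hq1

lemma pvDedupFirst_keys_nodup (l : List (String × String)) : ((pvDedupFirst l).map (·.1)).Nodup :=
  pvDedupFirst_keys_nodup_aux l.length l le_rfl

lemma pvOfList_items (l : List (String × String)) (h : (l.map (·.1)).Nodup) :
    (PySem.Dict.ofList l).items = l := by
  have := PySem.Dict.items_foldl_insert_fresh l (·.1) (·.2) (PySem.Dict.empty (κ := String) (ν := String))
    (by intro a _; exact PySem.Dict.contains_empty _) h
  simpa [PySem.Dict.ofList, PySem.Dict.update] using this

lemma pvFoldA (entries : List (List (String × String))) (d : PySem.Dict String String) :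
    (entries.foldl (fun (result : PySem.Dict String String) entry =>
      let title_id := pvNormalizeTitleId (((PySem.Dict.mk entry).get? "titleId").getD "")
      let name := PySem.Str.strip (((PySem.Dict.mk entry).get? "name").getD "")
      if title_id ≠ "" ∧ name ≠ "" ∧ result.contains title_id = false then
        result.insert title_id name
      else
        result) d).items
    = d.items ++ pvDedupFirst ((pvValidPairs entries).filter (fun p => !(d.contains p.1))) := by
  induction entries generalizing d with
  | nil => simp [pvValidPairs]
  | cons e rest ih =>
    simp only [List.foldl_cons]
    set t := pvNormalizeTitleId (((PySem.Dict.mk e).get? "titleId").getD "") with ht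
    set n := PySem.Str.strip (((PySem.Dict.mk e).get? "name").getD "") with hn
    have hvp : pvValidPairs (e :: rest) =
        if t ≠ "" && n ≠ "" then (t, n) :: pvValidPairs rest else pvValidPairs rest := by
      simp only [pvValidPairs, List.map_cons, List.filter_cons]
      rw [← ht, ← hn]
    by_cases hv : t ≠ "" ∧ n ≠ ""
    · by_cases hc : d.contains t = true
      · -- key already present: A skips, and the pair is filtered out
        rw [if_neg (by simp [hc]), ih d, hvp]
        simp [hv.1, hv.2, hc]
      · -- fresh key: A inserts; B keeps the pair and purges its key from the rest
        have hc' : d.contains t = false := by simpa using hc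
        rw [if_pos ⟨hv.1, hv.2, hc'⟩, ih (d.insert t n), hvp]
        rw [PySem.Dict.items_insert_of_not_contains _ _ hc']
        have hfilters : (pvValidPairs rest).filter (fun p => !((d.insert t n).contains p.1))
            = ((pvValidPairs rest).filter (fun p => !(d.contains p.1))).filter
                (fun q => q.1 ≠ t) := by
          rw [List.filter_filter]
          apply List.filter_congr
          intro p _
          rw [PySem.Dict.contains_insert]
          cases h2 : d.contains p.1 <;> by_cases h1 : p.1 = t <;>
            simp only [h1, beq_self_eq_true, Bool.or_false, Bool.or_true, Bool.not_true,
              Bool.not_false, Bool.and_false, Bool.and_true] <;> simp [h1]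
        rw [hfilters]
        simp [hv.1, hv.2, hc']
    · -- invalid pair: A skips, B's filter drops it
      rw [if_neg (fun hcontra => hv ⟨hcontra.1, hcontra.2.1⟩), ih d, hvp]
      have hb : (t ≠ "" && n ≠ "") = false := by
        rcases Decidable.not_and_iff_or_not.mp hv with h | h <;> simp [h]
      rw [hb]
      simp

-- ===== VERDICT (by name: the statement is the Claim_ definition above) =====
theorem build_catalog_name_map_spec : Claim_equal_build_catalog_name_map := by
  intro entries _
  unfold Spec_build_catalog_name_map build_catalog_name_map build_catalog_name_map_alt
  rw [pvFoldA entries PySem.Dict.empty,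
    pvOfList_items _ (pvDedupFirst_keys_nodup _)]
  rw [List.filter_eq_self.mpr (by intro p _; simp [PySem.Dict.contains_empty])]
  simp [PySem.Dict.empty]
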